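-- pv_equiv track=rewrite | github.com/choiyy0523/Algo | 프로그래머스/lv1/77884. 약수의 개수와 덧셈/약수의 개수와 덧셈.py | divisor_odd_check
-- ===== SOURCE A (Python) =====
-- def divisor_odd_check(n):
--     cnt = 0
--     for i in range(1, n+1):
--         if n % i == 0:
--             cnt += 1
--     if cnt % 2 == 0:
--         return True
--     else:
--         return False
-- ===== SOURCE B (Python) =====
-- def divisor_odd_check(n):
--     # divisor count of n is even iff n is not a perfect square:
--     # find the least i >= 1 with i*i >= n, then n is a square iff i*i == n.
--     i = 1
--     while i * i < n:
--         i += 1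
--     return i * i != n
-- ===== Notes on version B (the rewrite author's own statement) =====
-- stated objective: faster
-- what changed: B never counts divisors: it uses the fact that the divisor count is odd exactly for perfect squares, and finds the integer square root by incrementing i while i*i < n, so the O(n) trial-division loop becomes an O(sqrt(n)) loop with no modulo operations.
import Mathlib
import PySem

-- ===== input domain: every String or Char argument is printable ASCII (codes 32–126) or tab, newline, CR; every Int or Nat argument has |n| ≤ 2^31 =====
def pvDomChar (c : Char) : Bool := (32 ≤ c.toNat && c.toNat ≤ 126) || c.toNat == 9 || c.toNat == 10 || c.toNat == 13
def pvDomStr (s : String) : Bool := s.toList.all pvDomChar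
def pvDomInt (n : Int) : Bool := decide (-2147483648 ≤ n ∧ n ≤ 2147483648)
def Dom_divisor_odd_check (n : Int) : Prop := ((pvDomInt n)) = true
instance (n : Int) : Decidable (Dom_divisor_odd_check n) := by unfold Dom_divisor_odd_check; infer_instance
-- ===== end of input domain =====

-- B replaces A's divisor-counting loop by the perfect-square test (the divisor count is odd
-- iff n is a perfect square), finding the integer square root with an incrementing loop.

-- ===== PORT A =====
def divisor_odd_check (n : Int) : Bool :=
  let cnt : Int := (PySem.List.pyRange 1 (n + 1) 1).foldl
      (fun cnt i => if PySem.Int.mod n i == 0 then cnt + 1 else cnt) 0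
  if PySem.Int.mod cnt 2 == 0 then true else false

-- ===== PORT B =====
-- the `while i * i < n: i += 1` loop of Source B
def pvAltLoop (n i : Int) : Int :=
  if i * i < n then pvAltLoop n (i + 1) else i
termination_by (n - i).toNat
decreasing_by
  have hii : i ≤ i * i := by
    by_cases h : 1 ≤ i
    · nlinarith
    · nlinarith [mul_self_nonneg i]
  omega

def divisor_odd_check_alt (n : Int) : Bool :=
  let i := pvAltLoop n 1
  i * i != n

-- ===== PRECONDITION & SPEC =====
def Spec_divisor_odd_check (n : Int) (out : Bool) : Prop := out = divisor_odd_check_alt n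
instance (n : Int) (out : Bool) : Decidable (Spec_divisor_odd_check n out) := by unfold Spec_divisor_odd_check; infer_instance

-- ===== CLAIM (what is proved, stated in full; the proofs are below) =====
def Claim_equal_divisor_odd_check : Prop := ∀ (n : Int), Dom_divisor_odd_check n → Spec_divisor_odd_check n (divisor_odd_check n)

-- ===== LEMMAS AND PROOFS =====

-- A's loop accumulates a count: foldl = initial value + countP
theorem pv_foldl_count (l : List Int) (p : Int → Bool) (c : Int) :
    l.foldl (fun cnt i => if p i then cnt + 1 else cnt) c = c + (l.countP p : Int) := by
  induction l generalizing c with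
  | nil => simp
  | cons x xs ih =>
    by_cases h : p x <;> simp [List.countP_cons, h, ih] <;> push_cast <;> ring

-- countP over List.range is a Finset.range filter cardinality
theorem pv_countP_range (m : ℕ) (p : ℕ → Prop) [DecidablePred p] :
    (List.range m).countP (fun k => decide (p k)) = ((Finset.range m).filter p).card := by
  classical
  induction m with
  | zero => simp
  | succ k ih =>
    rw [List.range_succ, List.countP_append, Finset.range_add_one, Finset.filter_insert]
    by_cases h : p k
    · rw [if_pos h, Finset.card_insert_of_notMem (by simp)]
      simp [h, ih]
    · rw [if_neg h]
      simp [h, ih]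

-- the count over range(1, m+1) is the number of divisors of m
theorem pv_countP_eq_card_divisors (m : ℕ) (hm : m ≠ 0) :
    (List.range m).countP (fun k => decide ((k + 1) ∣ m)) = (Nat.divisors m).card := by
  rw [pv_countP_range]
  refine Finset.card_nbij (fun k => k + 1) ?_ ?_ ?_
  · intro k hk
    simp only [Finset.coe_filter, Set.mem_setOf_eq, Finset.mem_range] at hk
    simp [Nat.mem_divisors, hk.2, hm]
  · intro a _ b _ hab
    simp only at hab
    omega
  · intro d hd
    simp only [Finset.coe_sort_coe, Finset.mem_coe, Nat.mem_divisors] at hd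
    have hd1 : 1 ≤ d := Nat.pos_of_dvd_of_pos hd.1 (Nat.pos_of_ne_zero hm)
    have hdm : d ≤ m := Nat.le_of_dvd (Nat.pos_of_ne_zero hm) hd.1
    refine ⟨d - 1, ?_, by simp only; omega⟩
    simp only [Finset.coe_filter, Set.mem_setOf_eq, Finset.mem_range]
    constructor
    · omega
    · have : d - 1 + 1 = d := by omega
      rw [this]; exact hd.1

-- fixed-point-free part of the divisor set has even cardinality (pairing d ↔ m/d)
theorem pv_even_card_nonsquare_divisors (m : ℕ) (hm : m ≠ 0) :
    2 ∣ ((Nat.divisors m).filter (fun d => ¬ d * d = m)).card := by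
  classical
  have hmem : ∀ a ∈ (Nat.divisors m).filter (fun d => ¬ d * d = m), a ∣ m ∧ ¬ a * a = m := by
    intro a ha
    rw [Finset.mem_filter, Nat.mem_divisors] at ha
    exact ⟨ha.1.1, ha.2⟩
  have hsum : (∑ _x ∈ (Nat.divisors m).filter (fun d => ¬ d * d = m), (1 : ZMod 2)) = 0 := by
    refine Finset.sum_involution (fun a _ => m / a) (fun a _ => by decide) ?_ ?_ ?_
    · intro a ha _
      obtain ⟨hdvd, hne⟩ := hmem a ha
      intro hEq
      simp only at hEq
      have hma : m / a * a = m := Nat.div_mul_cancel hdvd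
      rw [hEq] at hma
      exact hne hma
    · intro a ha
      obtain ⟨hdvd, hne⟩ := hmem a ha
      have hdvd' : m / a ∣ m := Nat.div_dvd_of_dvd hdvd
      show m / a ∈ (Nat.divisors m).filter (fun d => ¬ d * d = m)
      rw [Finset.mem_filter, Nat.mem_divisors]
      refine ⟨⟨hdvd', hm⟩, ?_⟩
      intro hsq
      have ha0 : a ≠ 0 := by
        rintro rfl
        rw [Nat.zero_dvd] at hdvd
        exact hm hdvd
      have hma : m / a * a = m := Nat.div_mul_cancel hdvd
      have hd0 : 0 < m / a := by
        rcases Nat.eq_zero_or_pos (m / a) with h0 | h0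
        · rw [h0] at hma; simp at hma; exact absurd hma.symm hm
        · exact h0
      have hae : a = m / a := (Nat.eq_of_mul_eq_mul_left hd0 (hsq.trans hma.symm)).symm
      rw [← hae] at hsq
      exact hne hsq
    · intro a ha
      obtain ⟨hdvd, _⟩ := hmem a ha
      show m / (m / a) = a
      exact Nat.div_div_self hdvd hm
  have hcast : ((((Nat.divisors m).filter (fun d => ¬ d * d = m)).card : ℕ) : ZMod 2) = 0 := by
    simpa [Finset.sum_const, nsmul_eq_mul] using hsum
  exact (ZMod.natCast_eq_zero_iff _ _).mp hcast

-- parity of the divisor count ↔ being a perfect square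
theorem pv_odd_card_divisors_iff (m : ℕ) (hm : m ≠ 0) :
    ¬ 2 ∣ (Nat.divisors m).card ↔ ∃ d : ℕ, d * d = m := by
  classical
  have hsplit := Finset.card_filter_add_card_filter_not
    (s := Nat.divisors m) (p := fun d => d * d = m)
  obtain ⟨k, hk⟩ := pv_even_card_nonsquare_divisors m hm
  by_cases hsq : ∃ d : ℕ, d * d = m
  · obtain ⟨d, hd⟩ := hsq
    have hF : (Nat.divisors m).filter (fun x => x * x = m) = {d} := by
      ext e
      simp only [Finset.mem_filter, Nat.mem_divisors, Finset.mem_singleton]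
      constructor
      · rintro ⟨_, he⟩
        exact Nat.mul_self_inj.mp (he.trans hd.symm)
      · rintro rfl
        exact ⟨⟨⟨_, hd.symm⟩, hm⟩, hd⟩
    rw [hF] at hsplit
    simp only [Finset.card_singleton] at hsplit
    constructor
    · intro _; exact ⟨d, hd⟩
    · intro _; omega
  · have hF : (Nat.divisors m).filter (fun x => x * x = m) = ∅ := by
      rw [Finset.filter_eq_empty_iff]
      intro x _ hx
      exact hsq ⟨x, hx⟩
    rw [hF] at hsplit
    simp only [Finset.card_empty, Nat.zero_add] at hsplit
    constructor
    · intro h; omega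
    · rintro ⟨d, hd⟩; exact absurd ⟨d, hd⟩ hsq

-- the square-root loop of B: its result j satisfies n ≤ j*j, i ≤ j, and k*k < n below j
theorem pv_altLoop_spec (n : Int) : ∀ i : Int,
    n ≤ pvAltLoop n i * pvAltLoop n i ∧ i ≤ pvAltLoop n i ∧
    ∀ k, i ≤ k → k < pvAltLoop n i → k * k < n := by
  intro i
  induction i using pvAltLoop.induct n with
  | case1 i hlt ih =>
    have hstep : pvAltLoop n i = pvAltLoop n (i + 1) := by
      rw [pvAltLoop]
      rw [if_pos hlt]
    rw [hstep]
    refine ⟨ih.1, by have := ih.2.1; omega, ?_⟩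
    intro k hk1 hk2
    rcases eq_or_lt_of_le hk1 with rfl | h
    · exact hlt
    · exact ih.2.2 k (by omega) hk2
  | case2 i hge =>
    rw [pvAltLoop]
    rw [if_neg hge]
    refine ⟨by omega, le_refl _, ?_⟩
    intro k hk1 hk2
    omega

-- for n ≥ 1: B's loop result squares to n exactly when n has a ℕ square root
theorem pv_altLoop_sq_iff (n : Int) (hn : 0 < n) :
    (pvAltLoop n 1 * pvAltLoop n 1 = n) ↔ ∃ d : ℕ, d * d = n.toNat := by
  obtain ⟨h1, h2, h3⟩ := pv_altLoop_spec n 1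
  constructor
  · intro hj
    refine ⟨(pvAltLoop n 1).toNat, ?_⟩
    have hj1 : (1 : ℤ) ≤ pvAltLoop n 1 := h2
    have hcast : ((pvAltLoop n 1).toNat : ℤ) = pvAltLoop n 1 := Int.toNat_of_nonneg (by omega)
    have hz : ((pvAltLoop n 1).toNat : ℤ) * ((pvAltLoop n 1).toNat : ℤ) = ((n.toNat : ℕ) : ℤ) := by
      rw [hcast, hj, Int.toNat_of_nonneg (le_of_lt hn)]
    exact_mod_cast hz
  · rintro ⟨d, hd⟩
    have hdI : (d : ℤ) * (d : ℤ) = n := by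
      have h1 : ((d * d : ℕ) : ℤ) = ((n.toNat : ℕ) : ℤ) := by exact_mod_cast hd
      push_cast at h1
      rwa [Int.toNat_of_nonneg (le_of_lt hn)] at h1
    have hd1 : (1 : ℤ) ≤ (d : ℤ) := by
      by_contra h
      have : (d : ℤ) = 0 := by omega
      rw [this] at hdI; omega
    rcases lt_or_ge (d : ℤ) (pvAltLoop n 1) with hlt | hle
    · have := h3 (d : ℤ) hd1 hlt
      omega
    · have := h2
      nlinarith

-- A's counter over range(1, n+1) equals the divisor count of n.toNat (n ≥ 1)
theorem pv_A_cnt (n : Int) (hn : 0 < n) :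
    (PySem.List.pyRange 1 (n + 1) 1).foldl
      (fun cnt i => if PySem.Int.mod n i == 0 then cnt + 1 else cnt) 0
    = ((Nat.divisors n.toNat).card : Int) := by
  rw [pv_foldl_count]
  rw [PySem.List.pyRange_one]
  have hm : (n + 1 - 1).toNat = n.toNat := by omega
  rw [hm, List.countP_map]
  have hcong : (List.range n.toNat).countP
      ((fun i => PySem.Int.mod n i == 0) ∘ fun k : ℕ => (1 : ℤ) + k)
      = (List.range n.toNat).countP (fun k => decide ((k + 1) ∣ n.toNat)) := by
    apply List.countP_congr
    intro k hk
    simp only [Function.comp_apply, beq_iff_eq, decide_eq_true_eq]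
    rw [PySem.Int.mod_eq_emod_of_pos (by omega)]
    constructor
    · intro h
      have hdvdI : ((1 : ℤ) + k) ∣ n := Int.dvd_of_emod_eq_zero h
      have : ((k + 1 : ℕ) : ℤ) ∣ ((n.toNat : ℕ) : ℤ) := by
        rw [Int.toNat_of_nonneg (le_of_lt hn)]
        convert hdvdI using 2
        push_cast; ring
      exact_mod_cast this
    · intro h
      apply Int.emod_eq_zero_of_dvd
      have : ((k + 1 : ℕ) : ℤ) ∣ ((n.toNat : ℕ) : ℤ) := Int.natCast_dvd_natCast.mpr h
      rw [Int.toNat_of_nonneg (le_of_lt hn)] at this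
      convert this using 2
      push_cast; ring
  rw [hcong, pv_countP_eq_card_divisors n.toNat (by omega), zero_add]

-- ===== VERDICT (by name: the statement is the Claim_ definition above) =====
theorem divisor_odd_check_spec : Claim_equal_divisor_odd_check := by
  intro n _
  unfold Spec_divisor_odd_check divisor_odd_check divisor_odd_check_alt
  rcases lt_or_ge 0 n with hn | hn
  · -- n ≥ 1
    rw [pv_A_cnt n hn]
    set c : ℕ := (Nat.divisors n.toNat).card with hc
    have hmodA : PySem.Int.mod (c : Int) 2 = ((c % 2 : ℕ) : Int) := by
      rw [PySem.Int.mod_eq_emod_of_pos (by omega)]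
      exact (Int.natCast_mod c 2).symm
    have hsq := pv_altLoop_sq_iff n hn
    have hpar := pv_odd_card_divisors_iff n.toNat (by omega)
    rw [← hc] at hpar
    by_cases h2 : 2 ∣ c
    · have hA : (if PySem.Int.mod (c : Int) 2 == 0 then true else false) = true := by
        rw [hmodA]
        obtain ⟨t, ht⟩ := h2
        simp [ht, Nat.mul_mod_right]
      rw [hA]
      have hnsq : ¬ ∃ d : ℕ, d * d = n.toNat := fun h => (hpar.mpr h) h2
      have : pvAltLoop n 1 * pvAltLoop n 1 ≠ n := fun h => hnsq (hsq.mp h)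
      simp [bne_iff_ne, this]
    · have hA : (if PySem.Int.mod (c : Int) 2 == 0 then true else false) = false := by
        rw [hmodA]
        have : c % 2 = 1 := Nat.odd_iff.mp (Nat.odd_iff.mpr (by omega))
        simp [this]
      rw [hA]
      have hsq' : ∃ d : ℕ, d * d = n.toNat := hpar.mp h2
      have : pvAltLoop n 1 * pvAltLoop n 1 = n := hsq.mpr hsq'
      simp [bne_iff_ne, this]
  · -- n ≤ 0 : empty loop on A's side, loop exits immediately on B's side
    rw [PySem.List.pyRange_one_eq_nil (by omega)]
    rw [pvAltLoop]
    have hlt : ¬ ((1 : ℤ) * 1 < n) := by omega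
    rw [if_neg hlt]
    have h0 : (PySem.Int.mod (List.foldl
        (fun cnt i => if PySem.Int.mod n i == 0 then cnt + 1 else cnt) 0 ([] : List Int)) 2
        == 0) = true := by
      show (PySem.Int.mod 0 2 == 0) = true
      decide
    simp only [h0, if_true]
    symm
    simp only [bne_iff_ne, ne_eq]
    omega
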